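-- pv_equiv track=rewrite | github.com/pythonomar22/rl4rlm | scripts/aggregate_all_sft_data.py | infer_task_type_from_prompt
-- ===== SOURCE A (Python) =====
-- def infer_task_type_from_prompt(prompt: str) -> str:
--     """Try to infer task type from the prompt content."""
--     prompt_lower = prompt[:500].lower()
--     if any(k in prompt_lower for k in ["classify", "categories", "categorize"]):
--         return "doc_classify"
--     elif any(k in prompt_lower for k in ["secret code", "password is", "needle"]):
--         return "niah"
--     elif any(k in prompt_lower for k in ["how many events", "how many times", "count the"]):
--         return "event_counting"
--     elif any(k in prompt_lower for k in ["two budget reports", "two organizational",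
--                                           "two event timelines", "two performance",
--                                           "compare the following", "two directories",
--                                           "two annual reports"]):
--         return "cross_doc_compare"
--     elif any(k in prompt_lower for k in ["notebook", "jupyter"]):
--         return "notebook_qa"
--     elif any(k in prompt_lower for k in ["dataframe", "csv", "ticker", "stock",
--                                           "closing price", "highest average"]):
--         return "dataframe_qa"
--     elif any(k in prompt_lower for k in ["which function contains the bug", "find the bug",
--                                           "codebase contains"]):
--         return "code_debug"
--     elif any(k in prompt_lower for k in ["verbatim", "copy exactly", "reproduce"]):
--         return "verbatim_copy"
--     elif any(k in prompt_lower for k in ["key:", "value:", "lookup", "retrieve the value"]):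
--         return "key_value_retrieval"
--     elif any(k in prompt_lower for k in ["multi-hop", "multihop"]):
--         return "multi_hop_qa"
--     elif any(k in prompt_lower for k in ["which city", "what is the project",
--                                           "who leads", "who is the", "what is the budget",
--                                           "where did", "what award",
--                                           "based in", "leader of project"]):
--         return "multi_hop_qa"
--     elif any(k in prompt_lower for k in ["what is the project codename", "what is the code",
--                                           "vault password", "secret password"]):
--         return "niah"
--     elif any(k in prompt_lower for k in ["registry entry", "find the entry",
--                                           "return its category", "return only the"]):
--         return "key_value_retrieval"
--     elif any(k in prompt_lower for k in ["headquartered", "approved budget",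
--                                           "sponsored by", "project led by",
--                                           "earned", "rising star award",
--                                           "completed on time"]):
--         return "multi_hop_qa"
--     else:
--         return "unknown"
-- ===== SOURCE B (Python) =====
-- _LABELS = [
--     "doc_classify", "niah", "event_counting", "cross_doc_compare",
--     "notebook_qa", "dataframe_qa", "code_debug", "verbatim_copy",
--     "key_value_retrieval", "multi_hop_qa", "multi_hop_qa", "niah",
--     "key_value_retrieval", "multi_hop_qa",
-- ]
--
-- # Flat keyword -> priority index (all 60 keywords are pairwise distinct).
-- _KEYWORD_PRIORITY = {
--     "classify": 0, "categories": 0, "categorize": 0,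
--     "secret code": 1, "password is": 1, "needle": 1,
--     "how many events": 2, "how many times": 2, "count the": 2,
--     "two budget reports": 3, "two organizational": 3, "two event timelines": 3,
--     "two performance": 3, "compare the following": 3, "two directories": 3,
--     "two annual reports": 3,
--     "notebook": 4, "jupyter": 4,
--     "dataframe": 5, "csv": 5, "ticker": 5, "stock": 5,
--     "closing price": 5, "highest average": 5,
--     "which function contains the bug": 6, "find the bug": 6, "codebase contains": 6,
--     "verbatim": 7, "copy exactly": 7, "reproduce": 7,
--     "key:": 8, "value:": 8, "lookup": 8, "retrieve the value": 8,
--     "multi-hop": 9, "multihop": 9,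
--     "which city": 10, "what is the project": 10, "who leads": 10,
--     "who is the": 10, "what is the budget": 10, "where did": 10,
--     "what award": 10, "based in": 10, "leader of project": 10,
--     "what is the project codename": 11, "what is the code": 11,
--     "vault password": 11, "secret password": 11,
--     "registry entry": 12, "find the entry": 12,
--     "return its category": 12, "return only the": 12,
--     "headquartered": 13, "approved budget": 13, "sponsored by": 13,
--     "project led by": 13, "earned": 13, "rising star award": 13,
--     "completed on time": 13,
-- }
--
--
-- def infer_task_type_from_prompt(prompt: str) -> str:
--     """Try to infer task type from the prompt content."""
--     prompt_lower = prompt[:500].lower()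
--     best = min((prio for kw, prio in _KEYWORD_PRIORITY.items()
--                 if kw in prompt_lower), default=None)
--     return "unknown" if best is None else _LABELS[best]
-- ===== Notes on version B (the rewrite author's own statement) =====
-- stated objective: alternative
-- what changed: Replaced the ordered early-exit if/elif cascade with a flat keyword->priority index: B matches ALL keywords against the prompt, reduces the matches to the minimum priority, and maps that priority back to its label table (cascade order becomes data, the scan becomes an exhaustive match + min reduction).
import Mathlib
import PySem

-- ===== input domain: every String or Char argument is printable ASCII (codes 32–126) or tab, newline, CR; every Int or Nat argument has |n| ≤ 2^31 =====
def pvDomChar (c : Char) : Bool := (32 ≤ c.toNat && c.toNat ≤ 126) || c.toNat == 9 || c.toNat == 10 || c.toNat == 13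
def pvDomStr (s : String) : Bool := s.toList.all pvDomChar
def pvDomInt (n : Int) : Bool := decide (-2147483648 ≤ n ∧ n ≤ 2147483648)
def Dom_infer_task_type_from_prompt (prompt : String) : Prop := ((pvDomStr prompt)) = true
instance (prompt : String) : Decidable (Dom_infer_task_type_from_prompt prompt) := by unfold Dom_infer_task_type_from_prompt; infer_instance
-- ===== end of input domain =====

-- B replaces A's ordered early-exit if/elif cascade by a flat keyword→priority index: it matches
-- ALL keywords, takes the MINIMUM matched priority, and maps it back to a label table (objective: alternative; same cost).

-- ===== PORT A =====
def infer_task_type_from_prompt (prompt : String) : String :=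
  let prompt_lower := PySem.Str.lower (PySem.Str.slice prompt none (some 500))
  if (["classify", "categories", "categorize"]).any (fun k => PySem.Str.isIn k prompt_lower) then "doc_classify"
  else if (["secret code", "password is", "needle"]).any (fun k => PySem.Str.isIn k prompt_lower) then "niah"
  else if (["how many events", "how many times", "count the"]).any (fun k => PySem.Str.isIn k prompt_lower) then "event_counting"
  else if (["two budget reports", "two organizational", "two event timelines", "two performance", "compare the following", "two directories", "two annual reports"]).any (fun k => PySem.Str.isIn k prompt_lower) then "cross_doc_compare"
  else if (["notebook", "jupyter"]).any (fun k => PySem.Str.isIn k prompt_lower) then "notebook_qa"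
  else if (["dataframe", "csv", "ticker", "stock", "closing price", "highest average"]).any (fun k => PySem.Str.isIn k prompt_lower) then "dataframe_qa"
  else if (["which function contains the bug", "find the bug", "codebase contains"]).any (fun k => PySem.Str.isIn k prompt_lower) then "code_debug"
  else if (["verbatim", "copy exactly", "reproduce"]).any (fun k => PySem.Str.isIn k prompt_lower) then "verbatim_copy"
  else if (["key:", "value:", "lookup", "retrieve the value"]).any (fun k => PySem.Str.isIn k prompt_lower) then "key_value_retrieval"
  else if (["multi-hop", "multihop"]).any (fun k => PySem.Str.isIn k prompt_lower) then "multi_hop_qa"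
  else if (["which city", "what is the project", "who leads", "who is the", "what is the budget", "where did", "what award", "based in", "leader of project"]).any (fun k => PySem.Str.isIn k prompt_lower) then "multi_hop_qa"
  else if (["what is the project codename", "what is the code", "vault password", "secret password"]).any (fun k => PySem.Str.isIn k prompt_lower) then "niah"
  else if (["registry entry", "find the entry", "return its category", "return only the"]).any (fun k => PySem.Str.isIn k prompt_lower) then "key_value_retrieval"
  else if (["headquartered", "approved budget", "sponsored by", "project led by", "earned", "rising star award", "completed on time"]).any (fun k => PySem.Str.isIn k prompt_lower) then "multi_hop_qa"
  else "unknown"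

-- ===== PORT B =====
def pvLabels : List String :=
  ["doc_classify", "niah", "event_counting", "cross_doc_compare",
   "notebook_qa", "dataframe_qa", "code_debug", "verbatim_copy",
   "key_value_retrieval", "multi_hop_qa", "multi_hop_qa", "niah",
   "key_value_retrieval", "multi_hop_qa"]

-- flat keyword → priority index (all 60 keywords are pairwise distinct, so the Python dict is this association list)
def pvKeywordPrio : List (String × Nat) :=
  [("classify", 0), ("categories", 0), ("categorize", 0),
   ("secret code", 1), ("password is", 1), ("needle", 1),
   ("how many events", 2), ("how many times", 2), ("count the", 2),
   ("two budget reports", 3), ("two organizational", 3), ("two event timelines", 3),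
   ("two performance", 3), ("compare the following", 3), ("two directories", 3),
   ("two annual reports", 3),
   ("notebook", 4), ("jupyter", 4),
   ("dataframe", 5), ("csv", 5), ("ticker", 5), ("stock", 5),
   ("closing price", 5), ("highest average", 5),
   ("which function contains the bug", 6), ("find the bug", 6), ("codebase contains", 6),
   ("verbatim", 7), ("copy exactly", 7), ("reproduce", 7),
   ("key:", 8), ("value:", 8), ("lookup", 8), ("retrieve the value", 8),
   ("multi-hop", 9), ("multihop", 9),
   ("which city", 10), ("what is the project", 10), ("who leads", 10),
   ("who is the", 10), ("what is the budget", 10), ("where did", 10),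
   ("what award", 10), ("based in", 10), ("leader of project", 10),
   ("what is the project codename", 11), ("what is the code", 11),
   ("vault password", 11), ("secret password", 11),
   ("registry entry", 12), ("find the entry", 12),
   ("return its category", 12), ("return only the", 12),
   ("headquartered", 13), ("approved budget", 13), ("sponsored by", 13),
   ("project led by", 13), ("earned", 13), ("rising star award", 13),
   ("completed on time", 13)]

def infer_task_type_from_prompt_alt (prompt : String) : String :=
  let prompt_lower := PySem.Str.lower (PySem.Str.slice prompt none (some 500))
  let best := PySem.List.min?
      ((pvKeywordPrio.filter (fun kp => PySem.Str.isIn kp.1 prompt_lower)).map Prod.snd)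
      (fun x => x)
  match best with
  | none => "unknown"
  | some b => pvLabels.getD b "unknown"  -- _LABELS[best]: exact, best is always a valid index (priorities are 0..13)

-- ===== PRECONDITION & SPEC =====
def Spec_infer_task_type_from_prompt (prompt : String) (out : String) : Prop := out = infer_task_type_from_prompt_alt prompt
instance (prompt : String) (out : String) : Decidable (Spec_infer_task_type_from_prompt prompt out) := by unfold Spec_infer_task_type_from_prompt; infer_instance

-- ===== CLAIM (what is proved, stated in full; the proofs are below) =====
def Claim_equal_infer_task_type_from_prompt : Prop := ∀ (prompt : String), Dom_infer_task_type_from_prompt prompt → Spec_infer_task_type_from_prompt prompt (infer_task_type_from_prompt prompt)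

-- ===== LEMMAS AND PROOFS =====

-- proof-side view of A: the rule cascade as a list
def pvRules : List (String × List String) :=
  [("doc_classify", ["classify", "categories", "categorize"]),
   ("niah", ["secret code", "password is", "needle"]),
   ("event_counting", ["how many events", "how many times", "count the"]),
   ("cross_doc_compare", ["two budget reports", "two organizational", "two event timelines", "two performance", "compare the following", "two directories", "two annual reports"]),
   ("notebook_qa", ["notebook", "jupyter"]),
   ("dataframe_qa", ["dataframe", "csv", "ticker", "stock", "closing price", "highest average"]),
   ("code_debug", ["which function contains the bug", "find the bug", "codebase contains"]),
   ("verbatim_copy", ["verbatim", "copy exactly", "reproduce"]),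
   ("key_value_retrieval", ["key:", "value:", "lookup", "retrieve the value"]),
   ("multi_hop_qa", ["multi-hop", "multihop"]),
   ("multi_hop_qa", ["which city", "what is the project", "who leads", "who is the", "what is the budget", "where did", "what award", "based in", "leader of project"]),
   ("niah", ["what is the project codename", "what is the code", "vault password", "secret password"]),
   ("key_value_retrieval", ["registry entry", "find the entry", "return its category", "return only the"]),
   ("multi_hop_qa", ["headquartered", "approved budget", "sponsored by", "project led by", "earned", "rising star award", "completed on time"])]

def pvCascade (p : String) : List (String × List String) → String
  | [] => "unknown"
  | (l, kws) :: rest =>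
      if kws.any (fun k => PySem.Str.isIn k p) then l else pvCascade p rest

def pvFlatten (o : Nat) : List (String × List String) → List (String × Nat)
  | [] => []
  | (_, kws) :: rest => kws.map (fun k => (k, o)) ++ pvFlatten (o + 1) rest

theorem pvFlatten_ge (o : Nat) (rs : List (String × List String)) :
    ∀ kp ∈ pvFlatten o rs, o ≤ kp.2 := by
  induction rs generalizing o with
  | nil => simp [pvFlatten]
  | cons r rest ih =>
    obtain ⟨l, kws⟩ := r
    intro kp hkp
    simp only [pvFlatten, List.mem_append, List.mem_map] at hkp
    rcases hkp with ⟨k, _, rfl⟩ | h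
    · exact le_refl o
    · exact le_trans (Nat.le_succ o) (ih (o + 1) kp h)

theorem pvCascade_eq_min (p : String) (rs : List (String × List String)) (o : Nat) :
    pvCascade p rs =
      (match PySem.List.min?
          ((( pvFlatten o rs).filter (fun kp => PySem.Str.isIn kp.1 p)).map Prod.snd)
          (fun x => x) with
       | none => "unknown"
       | some b => (rs.map Prod.fst).getD (b - o) "unknown") := by
  induction rs generalizing o with
  | nil => simp [pvCascade, pvFlatten, PySem.List.min?]
  | cons r rest ih =>
    obtain ⟨l, kws⟩ := r
    have hfilt :
        (((pvFlatten o ((l, kws) :: rest)).filter (fun kp => PySem.Str.isIn kp.1 p)).map Prod.snd)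
          = List.replicate (kws.filter (fun k => PySem.Str.isIn k p)).length o
            ++ (((pvFlatten (o + 1) rest).filter (fun kp => PySem.Str.isIn kp.1 p)).map Prod.snd) := by
      simp [pvFlatten, List.filter_append, List.filter_map, Function.comp_def, List.map_const']
    rw [hfilt]
    by_cases hm : kws.any (fun k => PySem.Str.isIn k p) = true
    · -- this rule matches: the cascade returns l; the minimum over the flat list is o
      have hlen : (kws.filter (fun k => PySem.Str.isIn k p)).length ≠ 0 := by
        simp only [ne_eq, List.length_eq_zero_iff, List.filter_eq_nil_iff]
        simp only [List.any_eq_true] at hm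
        obtain ⟨k, hk, hkp⟩ := hm
        intro h; exact absurd hkp (by simpa using h k hk)
      set L := List.replicate (kws.filter (fun k => PySem.Str.isIn k p)).length o
            ++ (((pvFlatten (o + 1) rest).filter (fun kp => PySem.Str.isIn kp.1 p)).map Prod.snd)
        with hLdef
      have hoL : o ∈ L := by
        rw [hLdef]
        exact List.mem_append_left _ (List.mem_replicate.mpr ⟨hlen, rfl⟩)
      have hge : ∀ b ∈ L, o ≤ b := by
        intro b hb
        rw [hLdef] at hb
        rcases List.mem_append.mp hb with h | h
        · rw [(List.eq_of_mem_replicate h)]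
        · obtain ⟨kp, hkp, rfl⟩ := List.mem_map.mp h
          exact le_trans (Nat.le_succ o)
            (pvFlatten_ge (o + 1) rest kp (List.mem_of_mem_filter hkp))
      have hLne : L ≠ [] := fun h => by simp [h] at hoL
      obtain ⟨m, hmin⟩ : ∃ m, PySem.List.min? L (fun x => x) = some m := by
        cases hmin : PySem.List.min? L (fun x => x) with
        | none => exact absurd ((PySem.List.min?_eq_none_iff _ _).mp hmin) hLne
        | some m => exact ⟨m, rfl⟩
      have hmo : m = o :=
        le_antisymm (PySem.List.min?_isMin hmin o hoL) (hge m (PySem.List.min?_mem hmin))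
      show pvCascade p ((l, kws) :: rest) = _
      simp only [pvCascade]
      rw [if_pos hm, hmin, hmo]
      simp
    · -- this rule does not match: no keyword of it survives the filter; shift the offset and use the IH
      have hm' : kws.any (fun k => PySem.Str.isIn k p) = false := by
        simpa using hm
      have hnil : (kws.filter (fun k => PySem.Str.isIn k p)).length = 0 := by
        simp only [List.length_eq_zero_iff, List.filter_eq_nil_iff]
        intro k hk
        simpa using (List.any_eq_false.mp hm') k hk
      show pvCascade p ((l, kws) :: rest) = _
      simp only [pvCascade]
      rw [if_neg hm, ih (o + 1), hnil]
      simp only [List.replicate_zero, List.nil_append]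
      cases hmin : PySem.List.min?
          (((pvFlatten (o + 1) rest).filter (fun kp => PySem.Str.isIn kp.1 p)).map Prod.snd)
          (fun x => x) with
      | none => rfl
      | some b =>
        have hb : o + 1 ≤ b := by
          have hmem := PySem.List.min?_mem hmin
          obtain ⟨kp, hkp, rfl⟩ := List.mem_map.mp hmem
          exact pvFlatten_ge (o + 1) rest kp (List.mem_of_mem_filter hkp)
        have hsub : b - o = (b - (o + 1)) + 1 := by omega
        simp [hsub]

-- ===== VERDICT (by name: the statement is the Claim_ definition above) =====
theorem infer_task_type_from_prompt_spec : Claim_equal_infer_task_type_from_prompt := by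
  intro prompt _
  unfold Spec_infer_task_type_from_prompt
  have hA : infer_task_type_from_prompt prompt
      = pvCascade (PySem.Str.lower (PySem.Str.slice prompt none (some 500))) pvRules := rfl
  have hF : pvFlatten 0 pvRules = pvKeywordPrio := rfl
  have hL : pvRules.map Prod.fst = pvLabels := rfl
  rw [hA, pvCascade_eq_min _ pvRules 0, hF, hL]
  unfold infer_task_type_from_prompt_alt
  simp
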